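-- pv_equiv track=rewrite | github.com/Leedefend/sce-backend-odoo | addons/smart_construction_core/handlers/my_work_complete.py | _retryable_summary
-- ===== SOURCE A (Python) =====
-- def _retryable_summary(failed_items):
--     retryable = 0
--     non_retryable = 0
--     for item in failed_items or []:
--         if bool(item.get("retryable")):
--             retryable += 1
--         else:
--             non_retryable += 1
--     return {"retryable": retryable, "non_retryable": non_retryable}
-- ===== SOURCE B (Python) =====
-- def _retryable_summary(failed_items):
--     # Divide-and-conquer: split the list in half, summarize each half
--     # recursively, and merge the two summaries field-wise.
--     def go(items):
--         n = len(items)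
--         if n == 0:
--             return {"retryable": 0, "non_retryable": 0}
--         if n == 1:
--             r = 1 if bool(items[0].get("retryable")) else 0
--             return {"retryable": r, "non_retryable": 1 - r}
--         mid = n // 2
--         left = go(items[:mid])
--         right = go(items[mid:])
--         return {"retryable": left["retryable"] + right["retryable"],
--                 "non_retryable": left["non_retryable"] + right["non_retryable"]}
--     return go(list(failed_items or []))
-- ===== Notes on version B (the rewrite author's own statement) =====
-- stated objective: alternative
-- what changed: Replaces the single branch-counting loop with a divide-and-conquer recursion that splits the list in half, summarizes each half independently, and merges the two summaries field-wise (correct because the counts are associative sums).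
import Mathlib
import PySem

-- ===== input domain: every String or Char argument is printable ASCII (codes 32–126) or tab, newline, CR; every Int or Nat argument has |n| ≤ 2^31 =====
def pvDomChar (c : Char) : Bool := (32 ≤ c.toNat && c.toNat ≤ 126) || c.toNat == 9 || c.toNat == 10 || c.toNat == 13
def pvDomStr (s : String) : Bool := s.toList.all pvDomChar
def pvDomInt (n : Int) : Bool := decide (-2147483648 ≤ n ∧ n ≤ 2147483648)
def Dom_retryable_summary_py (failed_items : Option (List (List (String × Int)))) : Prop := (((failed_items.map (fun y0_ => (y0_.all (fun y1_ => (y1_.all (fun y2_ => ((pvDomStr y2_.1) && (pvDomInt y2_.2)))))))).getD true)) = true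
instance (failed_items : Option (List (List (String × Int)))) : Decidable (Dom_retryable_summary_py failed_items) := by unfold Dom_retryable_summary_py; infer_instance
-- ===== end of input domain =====

-- B summarizes by divide-and-conquer (split in half, merge the two summaries field-wise)
-- instead of A's single branch-counting loop (objective: alternative).

-- ===== PORT A =====
-- bool(item.get("retryable")): first-match assoc lookup; missing key or value 0 is falsy (exact)
def pvTruthyRetryable (item : List (String × Int)) : Bool :=
  match item.find? (fun p => p.1 == "retryable") with
  | some p => p.2 != 0
  | none => false

def retryable_summary_py (failed_items : Option (List (List (String × Int)))) : List (String × Int) :=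
  let items := failed_items.getD []      -- `failed_items or []` (None and [] both iterate as [])
  let s := items.foldl
    (fun (acc : Int × Int) item =>
      if pvTruthyRetryable item then (acc.1 + 1, acc.2) else (acc.1, acc.2 + 1))
    (0, 0)
  [("retryable", s.1), ("non_retryable", s.2)]

-- ===== PORT B =====
-- go(items): returns the summary dict, here as its (retryable, non_retryable) pair of values
def pvGoB (items : List (List (String × Int))) : Int × Int :=
  if _h0 : items.length ≤ 1 then
    match items with
    | [] => (0, 0)
    | x :: _ => if pvTruthyRetryable x then (1, 1 - 1) else (0, 1 - 0)
  else
    let mid := items.length / 2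
    let left := pvGoB (items.take mid)
    let right := pvGoB (items.drop mid)
    (left.1 + right.1, left.2 + right.2)
termination_by items.length
decreasing_by
  · simp only [List.length_take]; omega
  · simp only [List.length_drop]; omega

def retryable_summary_py_alt (failed_items : Option (List (List (String × Int)))) : List (String × Int) :=
  let s := pvGoB (failed_items.getD [])
  [("retryable", s.1), ("non_retryable", s.2)]

-- ===== PRECONDITION & SPEC =====
def Spec_retryable_summary_py (failed_items : Option (List (List (String × Int)))) (out : List (String × Int)) : Prop := out = retryable_summary_py_alt failed_items
instance (failed_items : Option (List (List (String × Int)))) (out : List (String × Int)) : Decidable (Spec_retryable_summary_py failed_items out) := by unfold Spec_retryable_summary_py; infer_instance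

-- ===== CLAIM (what is proved, stated in full; the proofs are below) =====
def Claim_equal_retryable_summary_py : Prop := ∀ (failed_items : Option (List (List (String × Int)))), Dom_retryable_summary_py failed_items → Spec_retryable_summary_py failed_items (retryable_summary_py failed_items)

-- ===== LEMMAS AND PROOFS =====
-- A's pair-fold computes (start + #retryable, start + #non-retryable)
theorem pvFold_pair (l : List (List (String × Int))) (a b : Int) :
    l.foldl (fun (acc : Int × Int) item =>
        if pvTruthyRetryable item then (acc.1 + 1, acc.2) else (acc.1, acc.2 + 1)) (a, b)
      = (a + l.countP pvTruthyRetryable,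
         b + ((l.length : Int) - l.countP pvTruthyRetryable)) := by
  induction l generalizing a b with
  | nil => simp
  | cons x xs ih =>
    simp only [List.foldl_cons, List.countP_cons, List.length_cons]
    by_cases h : pvTruthyRetryable x = true <;> simp [h, ih] <;> ring

-- B's divide-and-conquer recursion computes (#retryable, length - #retryable)
theorem pvGoB_eq_aux : ∀ (n : Nat) (l : List (List (String × Int))), l.length = n →
    pvGoB l = ((l.countP pvTruthyRetryable : Int),
               (l.length : Int) - l.countP pvTruthyRetryable) := by
  intro n
  induction n using Nat.strong_induction_on with
  | _ n ih =>
    intro l hl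
    rw [pvGoB]
    by_cases h : l.length ≤ 1
    · rw [dif_pos h]
      cases l with
      | nil => simp
      | cons x t =>
        have ht : t = [] := by cases t with
          | nil => rfl
          | cons a s => simp at h
        subst ht
        by_cases hx : pvTruthyRetryable x = true <;> simp [hx]
    · rw [dif_neg h]
      have h1 : (l.take (l.length / 2)).length < n := by
        simp [List.length_take]; omega
      have h2 : (l.drop (l.length / 2)).length < n := by
        simp [List.length_drop]; omega
      have hsplit : (l.take (l.length / 2)).countP pvTruthyRetryable
          + (l.drop (l.length / 2)).countP pvTruthyRetryable
          = l.countP pvTruthyRetryable := by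
        rw [← List.countP_append, List.take_append_drop]
      simp only [ih _ h1 _ rfl, ih _ h2 _ rfl, List.length_take, List.length_drop]
      refine Prod.ext ?_ ?_ <;> simp <;> omega

theorem pvGoB_eq (l : List (List (String × Int))) :
    pvGoB l = ((l.countP pvTruthyRetryable : Int),
               (l.length : Int) - l.countP pvTruthyRetryable) :=
  pvGoB_eq_aux l.length l rfl

-- ===== VERDICT (by name: the statement is the Claim_ definition above) =====
theorem retryable_summary_py_spec : Claim_equal_retryable_summary_py := by
  intro fi _
  unfold Spec_retryable_summary_py retryable_summary_py retryable_summary_py_alt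
  simp [pvFold_pair, pvGoB_eq]
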